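-- pv_equiv track=rewrite | github.com/barszu/ASD | nauka2/kolokwia/kol1/kol1.py | maxrank
-- ===== SOURCE A (Python) =====
-- def maxrank(T):
--   n = len(T)
--   global_max_rank = 0 #ogolna znaleziona najwieksza wartosc rangi
--   for i in range(0,n): #[0,n-1]
--     local_rank = 0 #dla i-tego
--     for j in range(0,i): #[0,i-1]
--       if T[j] < T[i]:
--         local_rank += 1
--     global_max_rank = max(global_max_rank , local_rank)
--   return global_max_rank
-- ===== SOURCE B (Python) =====
-- def maxrank(T):
--     # Keep a sorted list of the elements seen so far; for each new element,
--     # a hand-written binary search (bisect_left) gives the number of earlier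
--     # strictly-smaller elements directly, replacing A's Python-level inner scan.
--     pre = []
--     best = 0
--     for x in T:
--         lo = 0
--         hi = len(pre)
--         while lo < hi:
--             mid = (lo + hi) // 2
--             if pre[mid] < x:
--                 lo = mid + 1
--             else:
--                 hi = mid
--         if lo > best:
--             best = lo
--         pre.insert(lo, x)
--     return best
-- ===== Notes on version B (the rewrite author's own statement) =====
-- stated objective: faster
-- what changed: B maintains a sorted list of the elements seen so far and finds each element's count of earlier smaller elements by a hand-written binary search (bisect_left) instead of A's Python-level inner rescan of the whole prefix.
import Mathlib
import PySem

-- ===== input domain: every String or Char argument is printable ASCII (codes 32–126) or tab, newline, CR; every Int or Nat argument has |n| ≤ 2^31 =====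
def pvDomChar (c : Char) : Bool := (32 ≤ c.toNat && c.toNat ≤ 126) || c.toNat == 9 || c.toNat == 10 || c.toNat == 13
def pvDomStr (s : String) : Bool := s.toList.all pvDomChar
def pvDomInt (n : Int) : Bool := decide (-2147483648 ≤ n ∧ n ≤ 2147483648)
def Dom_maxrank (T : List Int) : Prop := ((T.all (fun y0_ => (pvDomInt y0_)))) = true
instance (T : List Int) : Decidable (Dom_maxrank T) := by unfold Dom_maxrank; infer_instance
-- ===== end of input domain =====

-- B replaces A's quadratic Python-level inner rescan by a sorted running list
-- queried with a hand-written binary search (objective: faster, constant-factor measured).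

-- ===== PORT A =====
def maxrank (T : List Int) : Int :=
  let n := T.length
  (PySem.List.pyRange 0 n 1).foldl (fun g i =>
    let l := (PySem.List.pyRange 0 i 1).foldl (fun l j =>
      if PySem.List.pyGetD T j 0 < PySem.List.pyGetD T i 0 then l + 1 else l) 0
    max g l) 0

-- ===== PORT B =====
-- B's 'while lo < hi' binary search, step for step
def pvBisect (pre : List Int) (x : Int) (lo hi : Int) : Int :=
  if h : lo < hi then
    let mid := PySem.Int.floordiv (lo + hi) 2
    if PySem.List.pyGetD pre mid 0 < x then pvBisect pre x (mid + 1) hi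
    else pvBisect pre x lo mid
  else lo
termination_by (hi - lo).toNat
decreasing_by
  · have hb := PySem.Int.floordiv_two_mid_bounds (le_of_lt h)
    omega
  · have hlt : PySem.Int.floordiv (lo + hi) 2 < hi := by
      rw [PySem.Int.floordiv_lt_iff_lt_mul (by omega)]; omega
    omega

def maxrank_alt (T : List Int) : Int :=
  (T.foldl (fun s x =>
      let lo := pvBisect s.1 x 0 s.1.length
      (PySem.List.insert s.1 lo x, if lo > s.2 then lo else s.2))
    (([] : List Int), (0 : Int))).2

-- ===== PRECONDITION & SPEC =====
def Spec_maxrank (T : List Int) (out : Int) : Prop := out = maxrank_alt T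
instance (T : List Int) (out : Int) : Decidable (Spec_maxrank T out) := by unfold Spec_maxrank; infer_instance

-- ===== CLAIM (what is proved, stated in full; the proofs are below) =====
def Claim_equal_maxrank : Prop := ∀ (T : List Int), Dom_maxrank T → Spec_maxrank T (maxrank T)

-- ===== LEMMAS AND PROOFS =====

-- In a ≤-sorted list, the first (countP (· < x)) positions are exactly those holding values < x.
lemma sorted_count_iff (x : Int) : ∀ (pre : List Int), pre.Pairwise (· ≤ ·) →
    ∀ k (hk : k < pre.length), (k < pre.countP (fun y => decide (y < x)) ↔ pre[k] < x) := by
  intro pre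
  induction pre with
  | nil => intro _ k hk; simp at hk
  | cons a t ih =>
    intro hs k hk
    have hst : t.Pairwise (· ≤ ·) := hs.tail
    have hha : ∀ y ∈ t, a ≤ y := fun y hy => (List.pairwise_cons.mp hs).1 y hy
    by_cases hax : a < x
    · rw [List.countP_cons]
      simp only [hax, decide_true]
      cases k with
      | zero => simpa using hax
      | succ k' =>
        have := ih hst k' (by simpa using hk)
        simpa [Nat.succ_lt_succ_iff] using this
    · have hzero : t.countP (fun y => decide (y < x)) = 0 := by
        rw [List.countP_eq_zero]
        intro y hy
        simp only [decide_eq_true_eq]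
        exact not_lt.mpr (le_trans (not_lt.mp hax) (hha y hy))
      rw [List.countP_cons]
      simp only [hax, decide_false, hzero]
      cases k with
      | zero => simpa using hax
      | succ k' =>
        have hk' : k' < t.length := by simpa using hk
        simp [not_lt.mpr (le_trans (not_lt.mp hax) (hha _ (List.getElem_mem hk')))]

-- binary search returns the count of strictly smaller elements (as an Int)
lemma pvBisect_correct : ∀ (n : Nat) (pre : List Int) (x lo hi : Int),
    (hi - lo).toNat = n →
    pre.Pairwise (· ≤ ·) →
    0 ≤ lo → lo ≤ hi → hi ≤ pre.length →
    (∀ k (hk : k < pre.length), k < lo.toNat → pre[k] < x) →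
    (∀ k (hk : k < pre.length), hi.toNat ≤ k → x ≤ pre[k]) →
    pvBisect pre x lo hi = ((pre.countP (fun y => decide (y < x)) : Nat) : Int) := by
  intro n
  induction n using Nat.strong_induction_on with
  | _ n ihn =>
    intro pre x lo hi hn hs h0 hlh hhl hinv1 hinv2
    rw [pvBisect]
    by_cases h : lo < hi
    · simp only [h, dif_pos]
      have hb := PySem.Int.floordiv_two_mid_bounds (le_of_lt h)
      have hmidlt : PySem.Int.floordiv (lo + hi) 2 < hi := by
        rw [PySem.Int.floordiv_lt_iff_lt_mul (by omega)]; omega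
      set mid := PySem.Int.floordiv (lo + hi) 2 with hmid
      have hmnn : 0 ≤ mid := le_trans h0 hb.1
      have hmlen : mid < (pre.length : Int) := lt_of_lt_of_le hmidlt hhl
      have hget : PySem.List.pyGetD pre mid 0 = pre[mid.toNat]'(by omega) :=
        PySem.List.pyGetD_eq_getElem pre 0 hmnn hmlen
      by_cases hc : PySem.List.pyGetD pre mid 0 < x
      · simp only [hc, if_pos]
        apply ihn ((hi - (mid + 1)).toNat) (by omega) pre x (mid + 1) hi rfl hs (by omega)
          (by omega) hhl
        · intro k hk hklt
          have hsorted := List.pairwise_iff_getElem.mp hs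
          have hkm : k ≤ mid.toNat := by omega
          rcases eq_or_lt_of_le hkm with heq | hlt
          · rw [hget] at hc; simpa [heq] using hc
          · have := hsorted k mid.toNat (by omega) (by omega) hlt
            rw [hget] at hc; exact lt_of_le_of_lt this hc
        · exact hinv2
      · simp only [hc]
        apply ihn ((mid - lo).toNat) (by omega) pre x lo mid rfl hs h0 (by omega) (by omega)
        · exact hinv1
        · intro k hk hkge
          have hsorted := List.pairwise_iff_getElem.mp hs
          have hxm : x ≤ pre[mid.toNat]'(by omega) := by rw [hget] at hc; omega
          rcases eq_or_lt_of_le hkge with heq | hlt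
          · subst heq; exact hxm
          · exact le_trans hxm (hsorted mid.toNat k (by omega) hk hlt)
    · simp only [h, dif_neg, not_false_iff]
      have heq : lo = hi := le_antisymm hlh (not_lt.mp h)
      set c := pre.countP (fun y => decide (y < x)) with hc
      have _hcle : c ≤ pre.length := List.countP_le_length
      have hiff := sorted_count_iff x pre hs
      have : lo.toNat = c := by
        by_contra hne
        rcases Nat.lt_or_ge lo.toNat c with hlt | hge
        · have hklen : lo.toNat < pre.length := by omega
          have := (hiff lo.toNat hklen).mpr ((hiff lo.toNat hklen).mp hlt)
          have hx := hinv2 lo.toNat hklen (by omega)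
          have := (hiff lo.toNat hklen).mp hlt
          omega
        · have hclt : c < lo.toNat := by omega
          have hklen : c < pre.length := by omega
          have hx := hinv1 c hklen hclt
          have := (hiff c hklen).mpr hx
          omega
      omega

-- PySem.List.insert at an in-range nonnegative index is take/cons/drop
lemma insert_eq_take_drop (xs : List Int) (i : Int) (a : Int) (h0 : 0 ≤ i)
    (h1 : i ≤ xs.length) :
    PySem.List.insert xs i a = xs.take i.toNat ++ a :: xs.drop i.toNat := by
  simp only [PySem.List.insert, PySem.List.sliceIndices]
  norm_num
  rw [if_neg (not_lt.mpr h0), min_eq_left h1]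

-- the count (as a Nat) of strictly smaller elements, shorthand
def cnt (l : List Int) (x : Int) : Nat := l.countP (fun y => decide (y < x))

-- inserting x at position cnt pre x keeps the list sorted
lemma sorted_insert (pre : List Int) (x : Int) (hs : pre.Pairwise (· ≤ ·)) :
    (pre.take (cnt pre x) ++ x :: pre.drop (cnt pre x)).Pairwise (· ≤ ·) := by
  have hiff := sorted_count_iff x pre hs
  have hcle : cnt pre x ≤ pre.length := List.countP_le_length
  rw [List.pairwise_append]
  refine ⟨hs.sublist (List.take_sublist _ _), ?_, ?_⟩
  · rw [List.pairwise_cons]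
    refine ⟨?_, hs.sublist (List.drop_sublist _ _)⟩
    intro y hy
    obtain ⟨k, hk, rfl⟩ := List.mem_iff_getElem.mp hy
    rw [List.getElem_drop]
    have hlen : cnt pre x + k < pre.length := by
      rw [List.length_drop] at hk; omega
    have := (hiff (cnt pre x + k) hlen)
    have hnot : ¬ (cnt pre x + k < cnt pre x) := by omega
    exact le_of_not_gt (fun hgt => hnot (this.mpr hgt))
  · intro a ha b hb
    obtain ⟨k, hk, rfl⟩ := List.mem_iff_getElem.mp ha
    rw [List.getElem_take] at *
    have hklen : k < pre.length := by
      rw [List.length_take] at hk; omega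
    have hklt : k < cnt pre x := by
      rw [List.length_take] at hk; omega
    have hax : pre[k] < x := (hiff k hklen).mp hklt
    rcases List.mem_cons.mp hb with rfl | hbt
    · exact le_of_lt hax
    · obtain ⟨m, hm, rfl⟩ := List.mem_iff_getElem.mp hbt
      rw [List.getElem_drop]
      have hmlen : cnt pre x + m < pre.length := by
        rw [List.length_drop] at hm; omega
      have hxb : x ≤ pre[cnt pre x + m] := by
        have := (hiff (cnt pre x + m) hmlen)
        exact le_of_not_gt (fun hgt => (by omega : ¬ (cnt pre x + m < cnt pre x)) (this.mpr hgt))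
      exact le_of_lt (lt_of_lt_of_le hax hxb)

lemma insert_perm (pre : List Int) (x : Int) (c : Nat) (_hcle : c ≤ pre.length) :
    (pre.take c ++ x :: pre.drop c).Perm (pre ++ [x]) := by
  have h1 : (pre.take c ++ x :: pre.drop c).Perm (x :: (pre.take c ++ pre.drop c)) :=
    List.perm_middle
  rw [List.take_append_drop] at h1
  exact h1.trans (List.perm_append_singleton x pre).symm

-- counting over range-indexes of T equals counting over the prefix of T
lemma cnt_range_take (T : List Int) (x : Int) : ∀ (i : Nat), i ≤ T.length →
    (List.range i).countP (fun j => decide (T.getD j 0 < x)) =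
      (T.take i).countP (fun y => decide (y < x)) := by
  intro i
  induction i with
  | zero => simp
  | succ i ih =>
    intro hle
    have hi : i < T.length := by omega
    rw [List.range_succ, List.countP_append, ih (by omega)]
    rw [List.take_add_one]
    rw [List.countP_append]
    have : T[i]? = some T[i] := List.getElem?_eq_getElem hi
    simp [this]

-- the common characterisation: running max of prefix-counts
def specM (T : List Int) : Int :=
  (List.range T.length).foldl
    (fun g i => max g ((cnt (T.take i) (T.getD i 0) : Nat) : Int)) 0

-- A computes specM
lemma maxrank_eq_specM (T : List Int) : maxrank T = specM T := by
  simp only [maxrank, specM]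
  rw [PySem.List.pyRange_zero_natCast, List.foldl_map]
  apply PySem.List.foldl_congr_mem
  intro acc i hi
  have hi' : i < T.length := by simpa using List.mem_range.mp hi
  congr 1
  rw [PySem.List.pyRange_zero_natCast, List.foldl_map]
  have : ∀ (a : Int), (List.range i).foldl
      (fun l (j : Nat) => if PySem.List.pyGetD T (j : Int) 0 < PySem.List.pyGetD T (i : Int) 0 then l + 1 else l) a =
      (List.range i).foldl (fun l j => if T.getD j 0 < T.getD i 0 then l + 1 else l) a := by
    intro a
    apply PySem.List.foldl_congr_mem
    intro acc' j _
    rw [PySem.List.pyGetD_natCast, PySem.List.pyGetD_natCast]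
  rw [this]
  rw [PySem.List.foldl_ite_add_one (p := fun j => T.getD j 0 < T.getD i 0)]
  rw [cnt_range_take T (T.getD i 0) i (le_of_lt hi')]
  simp [cnt]

-- the B loop invariant: sorted pre, a permutation of the processed prefix 'done'
lemma loopB (rest : List Int) : ∀ (pre done : List Int) (best : Int),
    pre.Pairwise (· ≤ ·) → pre.Perm done →
    (rest.foldl (fun s x =>
        let lo := pvBisect s.1 x 0 s.1.length
        (PySem.List.insert s.1 lo x, if lo > s.2 then lo else s.2)) (pre, best)).2 =
      (List.range rest.length).foldl
        (fun g i => max g ((cnt (done ++ rest.take i) (rest.getD i 0) : Nat) : Int)) best := by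
  induction rest with
  | nil => intro pre done best _ _; simp
  | cons x r ih =>
    intro pre done best hs hperm
    have hcnt : pvBisect pre x 0 pre.length = ((cnt pre x : Nat) : Int) := by
      apply pvBisect_correct ((pre.length : Int) - 0).toNat pre x 0 pre.length rfl hs
        (by omega) (by omega) (by omega)
      · intro k hk hklt; omega
      · intro k hk hge; omega
    have hcd : cnt pre x = cnt done x := List.Perm.countP_eq _ hperm
    have hcle : cnt pre x ≤ pre.length := List.countP_le_length
    have hinsert : PySem.List.insert pre ((cnt pre x : Nat) : Int) x =
        pre.take (cnt pre x) ++ x :: pre.drop (cnt pre x) := by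
      rw [insert_eq_take_drop pre _ x (by omega) (by exact_mod_cast hcle)]
      simp
    simp only [List.foldl_cons, hcnt, hinsert]
    rw [ih _ (done ++ [x]) _ (by simpa [Int.toNat_natCast] using sorted_insert pre x hs)
        ((insert_perm pre x (cnt pre x) hcle).trans (hperm.append_right [x]))]
    -- now massage the RHS
    have hlen : (x :: r).length = r.length + 1 := rfl
    rw [hlen, List.range_succ_eq_map, List.foldl_cons, List.foldl_map]
    have h0 : ((x :: r).take 0) = ([] : List Int) := rfl
    have hgd0 : (x :: r).getD 0 0 = x := rfl
    rw [h0, hgd0]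
    have hbest : (if ((cnt pre x : Nat) : Int) > best then ((cnt pre x : Nat) : Int) else best) =
        max best ((cnt done x : Nat) : Int) := by
      rw [← hcd]; rcases lt_or_ge best ((cnt pre x : Nat) : Int) with h | h
      · simp [h, max_eq_right (le_of_lt h)]
      · simp [not_lt.mpr h, max_eq_left h]
    rw [List.append_nil, hbest]
    apply PySem.List.foldl_congr_mem
    intro acc i _
    congr 2
    rw [List.append_assoc]
    simp [List.take_succ_cons]

-- ===== VERDICT (by name: the statement is the Claim_ definition above) =====
theorem maxrank_spec : Claim_equal_maxrank := by
  intro T _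
  unfold Spec_maxrank
  rw [maxrank_eq_specM]
  unfold maxrank_alt specM
  rw [loopB T [] [] 0 (by simp) (List.Perm.refl _)]
  simp [cnt]
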